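-- pv_equiv track=rewrite | github.com/akatsenis/LM-Stats-Suite | modules/common.py | dis_make_unique
-- ===== SOURCE A (Python) =====
-- def dis_make_unique(names):
--     out = []; seen = {}
--     for i, n in enumerate(names):
--         n = str(n).strip()
--         if n == "" or n.lower() == "nan":
--             n = f"Col{i+1}"
--         if n in seen:
--             seen[n] += 1; n = f"{n}_{seen[n]}"
--         else:
--             seen[n] = 1
--         out.append(n)
--     return out
-- ===== SOURCE B (Python) =====
-- def dis_make_unique(names):
--     # pass 1: clean every name (placeholder Col{i+1} for empty/'nan')
--     cleaned = []
--     for i, n in enumerate(names):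
--         s = str(n).strip()
--         if s == "" or s.lower() == "nan":
--             s = f"Col{i+1}"
--         cleaned.append(s)
--     # pass 2: index each cleaned name to its ordered list of positions
--     groups = {}
--     for i, s in enumerate(cleaned):
--         groups.setdefault(s, []).append(i)
--     # pass 3: scatter — first position keeps the name, later ones get _2, _3, ...
--     out = [""] * len(cleaned)
--     for name, ps in groups.items():
--         for k, p in enumerate(ps):
--             out[p] = name if k == 0 else f"{name}_{k + 1}"
--     return out
-- ===== Notes on version B (the rewrite author's own statement) =====
-- stated objective: alternative
-- what changed: A's single stateful loop with a running-count dict is replaced by three passes: clean every name, group each cleaned name's positions into a dict built once, then scatter the bare name at the first position and name_k at later ones into a preallocated output list.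
import Mathlib
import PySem

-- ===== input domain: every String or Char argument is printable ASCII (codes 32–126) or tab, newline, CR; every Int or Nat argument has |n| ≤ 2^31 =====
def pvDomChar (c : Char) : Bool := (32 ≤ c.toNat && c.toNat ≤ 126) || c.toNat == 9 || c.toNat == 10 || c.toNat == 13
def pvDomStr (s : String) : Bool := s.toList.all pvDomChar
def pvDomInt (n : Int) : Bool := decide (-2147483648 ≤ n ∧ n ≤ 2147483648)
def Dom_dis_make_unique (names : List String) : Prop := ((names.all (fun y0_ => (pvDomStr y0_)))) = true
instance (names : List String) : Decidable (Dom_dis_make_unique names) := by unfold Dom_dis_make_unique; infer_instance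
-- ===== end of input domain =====

-- B replaces A's single running-count loop by clean → group-positions-by-name → scatter (same results, alternative structure).


-- ===== PORT A =====
def dis_make_unique (names : List String) : List String :=
  ((PySem.List.enumerate names).foldl
    (fun (st : List String × PySem.Dict String Int) (p : Int × String) =>
      let n1 := PySem.Str.strip p.2
      let n2 := if n1 = "" ∨ PySem.Str.lower n1 = "nan" then "Col" ++ PySem.Int.toStr (p.1 + 1) else n1
      match st.2.get? n2 with
      | some v => (st.1 ++ [n2 ++ "_" ++ PySem.Int.toStr (v + 1)], st.2.insert n2 (v + 1))
      | none => (st.1 ++ [n2], st.2.insert n2 1))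
    ([], PySem.Dict.empty)).1

-- ===== PORT B =====
def dis_make_unique_alt (names : List String) : List String :=
  let cleaned := (PySem.List.enumerate names).foldl
    (fun (cl : List String) (p : Int × String) =>
      let s := PySem.Str.strip p.2
      let s := if s = "" ∨ PySem.Str.lower s = "nan" then "Col" ++ PySem.Int.toStr (p.1 + 1) else s
      cl ++ [s]) []
  let groups := (PySem.List.enumerate cleaned).foldl
    (fun (d : PySem.Dict String (List Int)) (p : Int × String) =>
      d.modify p.2 [] (fun l => l ++ [p.1])) PySem.Dict.empty
  let out0 := List.replicate cleaned.length ""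
  groups.items.foldl
    (fun (out : List String) (pr : String × List Int) =>
      (PySem.List.enumerate pr.2).foldl
        (fun (out : List String) (q : Int × Int) =>
          -- out[p] = …: positions q.2 come from enumerate, so 0 ≤ q.2 < len(out); .toNat is exact here
          out.set q.2.toNat (if q.1 = 0 then pr.1 else pr.1 ++ "_" ++ PySem.Int.toStr (q.1 + 1))) out) out0

-- ===== PRECONDITION & SPEC =====
def Spec_dis_make_unique (names : List String) (out : List String) : Prop := out = dis_make_unique_alt names
instance (names : List String) (out : List String) : Decidable (Spec_dis_make_unique names out) := by unfold Spec_dis_make_unique; infer_instance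

-- ===== CLAIM (what is proved, stated in full; the proofs are below) =====
def Claim_equal_dis_make_unique : Prop := ∀ (names : List String), Dom_dis_make_unique names → Spec_dis_make_unique names (dis_make_unique names)

-- ===== LEMMAS AND PROOFS =====

-- the cleaning step applied to one enumerated entry
def pvClean (p : Int × String) : String :=
  let s := PySem.Str.strip p.2
  if s = "" ∨ PySem.Str.lower s = "nan" then "Col" ++ PySem.Int.toStr (p.1 + 1) else s

-- the cleaned list both programs work on
def pvC (names : List String) : List String := (PySem.List.enumerate names).map pvClean

-- A's loop body after cleaning
def pvStep (st : List String × PySem.Dict String Int) (x : String) : List String × PySem.Dict String Int :=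
  match st.2.get? x with
  | some v => (st.1 ++ [x ++ "_" ++ PySem.Int.toStr (v + 1)], st.2.insert x (v + 1))
  | none => (st.1 ++ [x], st.2.insert x 1)

-- the common specification of the output at index j of the cleaned list cs
def pvSpecAt (cs : List String) (j : Nat) : String :=
  let x := cs.getD j ""
  let k := (cs.take (j + 1)).count x
  if k = 1 then x else x ++ "_" ++ PySem.Int.toStr (k : Int)

def pvTarget (cs : List String) : List String := (List.range cs.length).map (pvSpecAt cs)

-- ordered positions of n in cs, starting at index i0
def pvPosF : List String → String → Int → List Int
  | [], _, _ => []
  | x :: rest, n, i0 => (if x = n then [i0] else []) ++ pvPosF rest n (i0 + 1)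


-- A's occurrence-numbering loop as a recursion over the cleaned list with explicit processed prefix
def pvG : List String → List String → List String
  | _, [] => []
  | pref, x :: rest =>
    (if pref.count x + 1 = 1 then x else x ++ "_" ++ PySem.Int.toStr ((pref.count x : Int) + 1))
      :: pvG (pref ++ [x]) rest

theorem pvA_eq_fold (names : List String) :
    dis_make_unique names = ((pvC names).foldl pvStep ([], PySem.Dict.empty)).1 := by
  simp only [dis_make_unique, pvC, List.foldl_map]; rfl

theorem pvA_loop (rest : List String) : ∀ (pref out : List String) (seen : PySem.Dict String Int),
    (∀ n : String, seen.get? n = if pref.count n = 0 then none else some ((pref.count n : Int))) →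
    (rest.foldl pvStep (out, seen)).1 = out ++ pvG pref rest := by
  induction rest with
  | nil => intro pref out seen hinv; simp [pvG]
  | cons x rest ih =>
    intro pref out seen hinv
    rw [List.foldl_cons]
    by_cases hc : pref.count x = 0
    · have hstep : pvStep (out, seen) x = (out ++ [x], seen.insert x 1) := by
        simp [pvStep, hinv x, hc]
      have hinv' : ∀ n : String, ((seen.insert x 1).get? n) =
          if (pref ++ [x]).count n = 0 then none else some (((pref ++ [x]).count n : Int)) := by
        intro n
        rw [PySem.Dict.get?_insert]
        by_cases hn : n = x
        · subst hn; simp [List.count_append, hc]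
        · have hcx : ([x].count n) = 0 := by
            simp [Ne.symm hn]
          simp [hn, hinv n, List.count_append, hcx]
      rw [hstep, ih (pref ++ [x]) _ _ hinv']
      have hg : pvG pref (x :: rest) = x :: pvG (pref ++ [x]) rest := by
        simp [pvG, hc]
      rw [hg]; simp
    · have hstep : pvStep (out, seen) x =
          (out ++ [x ++ "_" ++ PySem.Int.toStr ((pref.count x : Int) + 1)],
           seen.insert x ((pref.count x : Int) + 1)) := by
        simp [pvStep, hinv x, hc]
      have hinv' : ∀ n : String, ((seen.insert x ((pref.count x : Int) + 1)).get? n) =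
          if (pref ++ [x]).count n = 0 then none else some (((pref ++ [x]).count n : Int)) := by
        intro n
        rw [PySem.Dict.get?_insert]
        by_cases hn : n = x
        · subst hn
          have : (pref ++ [n]).count n = pref.count n + 1 := by simp [List.count_append]
          simp [this]
        · have hcx : ([x].count n) = 0 := by
            simp [Ne.symm hn]
          simp [hn, hinv n, List.count_append, hcx]
      rw [hstep, ih (pref ++ [x]) _ _ hinv']
      have hg : pvG pref (x :: rest) =
          (x ++ "_" ++ PySem.Int.toStr ((pref.count x : Int) + 1)) :: pvG (pref ++ [x]) rest := by
        simp [pvG, hc]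
      rw [hg]; simp

theorem pvG_eq_target (rest : List String) : ∀ (pref : List String),
    pvG pref rest = (List.range rest.length).map (fun i => pvSpecAt (pref ++ rest) (pref.length + i)) := by
  induction rest with
  | nil => intro pref; simp [pvG]
  | cons x rest ih =>
    intro pref
    rw [List.length_cons, List.range_succ_eq_map, List.map_cons, List.map_map]
    have hhead : pvSpecAt (pref ++ x :: rest) (pref.length + 0) =
        (if pref.count x + 1 = 1 then x else x ++ "_" ++ PySem.Int.toStr ((pref.count x : Int) + 1)) := by
      have hget : (pref ++ x :: rest).getD (pref.length + 0) "" = x := by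
        simp [List.getD_eq_getElem?_getD]
      have htake : (pref ++ x :: rest).take (pref.length + 0 + 1) = pref ++ [x] := by
        rw [List.take_append]
        simp
      rw [pvSpecAt, hget, htake]
      have hk : (pref ++ [x]).count x = pref.count x + 1 := by simp [List.count_append]
      rw [hk]
      by_cases h1 : pref.count x + 1 = 1
      · simp [h1]
      · simp only [if_neg h1]
        push_cast; ring_nf
    have htail : (List.range rest.length).map ((fun i => pvSpecAt (pref ++ x :: rest) (pref.length + i)) ∘ (fun i => i + 1)) =
        pvG (pref ++ [x]) rest := by
      rw [ih (pref ++ [x])]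
      apply List.map_congr_left
      intro i _
      simp only [Function.comp]
      congr 1
      · simp
      · simp; omega
    rw [pvG, hhead, htail]

theorem pvA_target (names : List String) : dis_make_unique names = pvTarget (pvC names) := by
  rw [pvA_eq_fold,
    pvA_loop (pvC names) [] [] PySem.Dict.empty (by intro n; simp [PySem.Dict.get?_empty]),
    pvG_eq_target]
  simp [pvTarget]

theorem pv_mem_posF (cs : List String) : ∀ (n : String) (i0 : Int) (p : Int), p ∈ pvPosF cs n i0 →
    ∃ jn : Nat, p = i0 + (jn : Int) ∧ cs[jn]? = some n := by
  induction cs with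
  | nil => intro n i0 p h; simp [pvPosF] at h
  | cons x rest ih =>
    intro n i0 p h
    simp only [pvPosF, List.mem_append] at h
    rcases h with h | h
    · by_cases hx : x = n
      · simp [hx] at h
        exact ⟨0, by simp [h], by simp [hx]⟩
      · simp [hx] at h
    · obtain ⟨jn, hp, hj⟩ := ih n (i0 + 1) p h
      exact ⟨jn + 1, by push_cast; omega, by simpa using hj⟩

theorem pv_posF_ge (cs : List String) (n : String) (i0 : Int) (p : Int) (h : p ∈ pvPosF cs n i0) :
    i0 ≤ p := by
  obtain ⟨jn, hp, -⟩ := pv_mem_posF cs n i0 p h; omega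

theorem pv_posF_pairwise (cs : List String) : ∀ (n : String) (i0 : Int),
    (pvPosF cs n i0).Pairwise (· < ·) := by
  induction cs with
  | nil => intro n i0; simp [pvPosF]
  | cons x rest ih =>
    intro n i0
    by_cases hx : x = n
    · subst hx
      have hstep : pvPosF (x :: rest) x i0 = i0 :: pvPosF rest x (i0 + 1) := by simp [pvPosF]
      rw [hstep, List.pairwise_cons]
      exact ⟨fun p hp => by have := pv_posF_ge rest x (i0 + 1) p hp; omega, ih x (i0 + 1)⟩
    · simp only [pvPosF, if_neg hx, List.nil_append]
      exact ih n (i0 + 1)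

theorem pv_posF_nodup (cs : List String) (n : String) (i0 : Int) : (pvPosF cs n i0).Nodup :=
  (pv_posF_pairwise cs n i0).imp (fun h => by omega)

theorem pv_findIdx_posF (cs : List String) : ∀ (n : String) (i0 : Int) (jn : Nat),
    (pvPosF cs n i0).findIdx? (fun p => p == i0 + (jn : Int)) =
      if cs[jn]? = some n then some ((cs.take jn).count n) else none := by
  induction cs with
  | nil => intro n i0 jn; simp [pvPosF]
  | cons x rest ih =>
    intro n i0 jn
    have hpred : ∀ m : Nat, (fun p : Int => p == i0 + ((m + 1 : Nat) : Int)) =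
        (fun p : Int => p == (i0 + 1) + (m : Int)) := by
      intro m; funext p
      have : i0 + ((m + 1 : Nat) : Int) = (i0 + 1) + (m : Int) := by push_cast; ring
      rw [this]
    by_cases hx : x = n
    · subst hx
      have hstep : pvPosF (x :: rest) x i0 = i0 :: pvPosF rest x (i0 + 1) := by
        simp [pvPosF]
      cases jn with
      | zero => simp [hstep, List.findIdx?_cons]
      | succ m =>
        have hne : (i0 == i0 + ((m + 1 : Nat) : Int)) = false := by
          simp only [beq_eq_false_iff_ne, ne_eq]; push_cast; omega
        rw [hstep, List.findIdx?_cons, hne, if_neg (by simp), hpred m, ih x (i0 + 1) m]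
        simp only [List.getElem?_cons_succ, List.take_succ_cons, List.count_cons_self]
        by_cases hr : rest[m]? = some x
        · simp [hr]
        · simp [hr]
    · have hstep : pvPosF (x :: rest) n i0 = pvPosF rest n (i0 + 1) := by
        simp [pvPosF, hx]
      cases jn with
      | zero =>
        have hnone : (pvPosF rest n (i0 + 1)).findIdx? (fun p => p == i0 + ((0 : Nat) : Int)) = none := by
          rw [List.findIdx?_eq_none_iff]
          intro p hp
          have := pv_posF_ge rest n (i0 + 1) p hp
          simp only [beq_eq_false_iff_ne, ne_eq]; push_cast; omega
        rw [hstep, hnone, List.getElem?_cons_zero]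
        simp [hx]
      | succ m =>
        have hcount : ((x :: rest).take (m + 1)).count n = (rest.take m).count n := by
          simp [List.take_succ_cons, hx]
        rw [hstep, hpred m, ih n (i0 + 1) m, List.getElem?_cons_succ, hcount]

theorem pv_pos_filter (cs : List String) : ∀ (n : String) (i0 : Int),
    ((PySem.List.enumerate cs i0).filter (fun p => p.2 == n)).map (·.1) = pvPosF cs n i0 := by
  induction cs with
  | nil => intro n i0; simp [pvPosF, PySem.List.enumerate_nil]
  | cons x rest ih =>
    intro n i0
    by_cases hx : x = n
    · simp [PySem.List.enumerate_cons, pvPosF, hx, ih]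
    · simp [PySem.List.enumerate_cons, pvPosF, hx, ih]

def pvSetStep (n : String) (out : List String) (q : Int × Int) : List String :=
  out.set q.2.toNat (if q.1 = 0 then n else n ++ "_" ++ PySem.Int.toStr (q.1 + 1))

theorem pv_inner (n : String) (ps : List Int) : ∀ (k0 : Int) (out : List String),
    (∀ p ∈ ps, ∃ jp : Nat, p = (jp : Int) ∧ jp < out.length) → ps.Nodup →
    ((PySem.List.enumerate ps k0).foldl (pvSetStep n) out).length = out.length ∧
    ∀ j : Nat, ((PySem.List.enumerate ps k0).foldl (pvSetStep n) out)[j]? =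
      match ps.findIdx? (fun p => p == (j : Int)) with
      | some r => some (if k0 + (r : Int) = 0 then n else n ++ "_" ++ PySem.Int.toStr (k0 + (r : Int) + 1))
      | none => out[j]? := by
  induction ps with
  | nil => intro k0 out _ _; simp [PySem.List.enumerate_nil]
  | cons p ps ih =>
    intro k0 out hbnd hnd
    obtain ⟨jp, hpj, hjp⟩ := hbnd p (List.mem_cons_self ..)
    rw [PySem.List.enumerate_cons, List.foldl_cons]
    have hlen1 : (pvSetStep n out (k0, p)).length = out.length := by simp [pvSetStep]
    have hbnd' : ∀ q ∈ ps, ∃ jq : Nat, q = (jq : Int) ∧ jq < (pvSetStep n out (k0, p)).length := by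
      intro q hq; obtain ⟨jq, h1, h2⟩ := hbnd q (List.mem_cons_of_mem _ hq)
      exact ⟨jq, h1, by omega⟩
    obtain ⟨hlenr, hgetr⟩ := ih (k0 + 1) (pvSetStep n out (k0, p)) hbnd' hnd.of_cons
    refine ⟨by rw [hlenr, hlen1], ?_⟩
    intro j
    rw [hgetr j, List.findIdx?_cons]
    by_cases hpj' : p = (j : Int)
    · have hjpj : jp = j := by omega
      subst hjpj
      have hnone : ps.findIdx? (fun q => q == (jp : Int)) = none := by
        rw [List.findIdx?_eq_none_iff]
        intro q hq
        have hne : q ≠ p := fun h => (List.nodup_cons.mp hnd).1 (h ▸ hq)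
        simp only [beq_eq_false_iff_ne, ne_eq]
        omega
      rw [hnone, if_pos (by simp [hpj'])]
      have hset : (pvSetStep n out (k0, p))[jp]? =
          some (if k0 = 0 then n else n ++ "_" ++ PySem.Int.toStr (k0 + 1)) := by
        have hpn : p.toNat = jp := by omega
        simp [pvSetStep, hpn, hjp]
      rw [hset]
      norm_num
    · rw [if_neg (by simp [hpj'])]
      have hset : (pvSetStep n out (k0, p))[j]? = out[j]? := by
        have hpn : p.toNat ≠ j := by omega
        simp [pvSetStep, hpn]
      cases h : ps.findIdx? (fun q => q == (j : Int)) with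
      | none => simp [hset]
      | some r =>
        have harith : k0 + 1 + (r : Int) = k0 + ((r + 1 : Nat) : Int) := by push_cast; ring
        simp only [Option.map_some, harith]

def pvScatter (out : List String) (pr : String × List Int) : List String :=
  (PySem.List.enumerate pr.2).foldl (pvSetStep pr.1) out

theorem pv_outer (cs : List String) (keys : List String) : ∀ (out : List String),
    out.length = cs.length → keys.Nodup →
    ((keys.map (fun n => (n, pvPosF cs n 0))).foldl pvScatter out).length = out.length ∧
    ∀ j : Nat, j < cs.length →
      ((keys.map (fun n => (n, pvPosF cs n 0))).foldl pvScatter out)[j]? =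
        if cs.getD j "" ∈ keys then some (pvSpecAt cs j) else out[j]? := by
  induction keys with
  | nil => intro out _ _; simp
  | cons n keys ih =>
    intro out hlen hnd
    rw [List.map_cons, List.foldl_cons]
    have hbnd : ∀ p ∈ pvPosF cs n 0, ∃ jp : Nat, p = (jp : Int) ∧ jp < out.length := by
      intro p hp
      obtain ⟨jn, h1, h2⟩ := pv_mem_posF cs n 0 p hp
      exact ⟨jn, by omega, by rw [hlen]; exact (List.getElem?_eq_some_iff.mp h2).1⟩
    obtain ⟨hl1, hg1⟩ := pv_inner n (pvPosF cs n 0) 0 out hbnd (pv_posF_nodup cs n 0)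
    have hscat : pvScatter out (n, pvPosF cs n 0) =
        (PySem.List.enumerate (pvPosF cs n 0)).foldl (pvSetStep n) out := rfl
    obtain ⟨hl2, hg2⟩ := ih (pvScatter out (n, pvPosF cs n 0))
      (by rw [hscat, hl1, hlen]) hnd.of_cons
    refine ⟨by rw [hl2, hscat, hl1], ?_⟩
    intro j hj
    rw [hg2 j hj]
    have hgetD : cs.getD j "" = cs[j] := List.getD_eq_getElem cs "" hj
    have hjx : cs[j]? = some cs[j] := List.getElem?_eq_some_iff.mpr ⟨hj, rfl⟩
    have hrank := pv_findIdx_posF cs n 0 j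
    simp only [zero_add] at hrank
    by_cases hmem : cs[j] ∈ keys
    · rw [hgetD, if_pos hmem, if_pos (List.mem_cons_of_mem n hmem)]
    · have hout1 := hg1 j
      rw [← hscat] at hout1
      by_cases hxn : cs[j] = n
      · have hfind : (pvPosF cs n 0).findIdx? (fun p => p == (j : Int)) =
            some ((cs.take j).count n) := by
          rw [hrank, if_pos (by rw [hjx, hxn])]
        rw [hfind] at hout1
        set r := (cs.take j).count n with hr
        have hspec : pvSpecAt cs j =
            (if (0 : Int) + (r : Int) = 0 then n else n ++ "_" ++ PySem.Int.toStr ((0 : Int) + (r : Int) + 1)) := by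
          have htake : cs.take (j + 1) = cs.take j ++ [cs[j]] := by
            rw [List.take_add_one, hjx]; rfl
          rw [pvSpecAt, hgetD, htake, hxn]
          have hcnt : ((cs.take j) ++ [n]).count n = r + 1 := by simp [List.count_append, hr]
          rw [hcnt]
          by_cases hr0 : r = 0
          · simp [hr0]
          · rw [if_neg (by omega), if_neg (by omega)]
            push_cast
            ring_nf
        have hmem' : cs[j] ∈ n :: keys := by rw [hxn]; exact List.mem_cons_self ..
        rw [hgetD, if_neg hmem, if_pos hmem', hout1, hspec]
      · have hfind : (pvPosF cs n 0).findIdx? (fun p => p == (j : Int)) = none := by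
          rw [hrank, if_neg (by rw [hjx]; simp [hxn])]
        rw [hfind] at hout1
        have hmem' : cs[j] ∉ n :: keys := by simp [hxn, hmem]
        rw [hgetD, if_neg hmem, if_neg hmem', hout1]

theorem pvB_target (names : List String) : dis_make_unique_alt names = pvTarget (pvC names) := by
  have hclean : (PySem.List.enumerate names).foldl
      (fun (cl : List String) (p : Int × String) =>
        let s := PySem.Str.strip p.2
        let s := if s = "" ∨ PySem.Str.lower s = "nan" then "Col" ++ PySem.Int.toStr (p.1 + 1) else s
        cl ++ [s]) [] = pvC names := by
    have h := PySem.List.foldl_append_singleton_eq_map pvClean (PySem.List.enumerate names) []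
    simpa [pvC] using h
  set cs := pvC names with hcs
  set groups := (PySem.List.enumerate cs).foldl
    (fun (d : PySem.Dict String (List Int)) (p : Int × String) =>
      d.modify p.2 [] (fun l => l ++ [p.1])) PySem.Dict.empty with hgroups
  have hkeys : groups.keys = PySem.Set.ofList cs := by
    rw [hgroups,
      PySem.Dict.keys_foldl_modify_key (PySem.List.enumerate cs) (·.2)
        [] (fun d p => fun l => l ++ [p.1]) PySem.Dict.empty,
      PySem.List.map_snd_enumerate]
    exact PySem.Set.update_nil_left cs
  have hnodup : groups.keys.Nodup := by rw [hkeys]; exact PySem.Set.nodup_ofList cs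
  have hgetD : ∀ n : String, groups.getD n [] = pvPosF cs n 0 := by
    intro n
    have hswap : groups = ((PySem.List.enumerate cs).map (fun p => (p.2, p.1))).foldl
        (fun (d : PySem.Dict String (List Int)) q => d.modify q.1 [] (fun l => l ++ [q.2]))
        PySem.Dict.empty := by
      rw [List.foldl_map]
    rw [hswap, PySem.Dict.getD_foldl_modify_append, PySem.Dict.getD_empty, List.filter_map,
      List.map_map]
    have hpred : ((fun q : String × Int => q.1 == n) ∘ (fun p : Int × String => (p.2, p.1))) =
        (fun p : Int × String => p.2 == n) := rfl
    have hproj : ((fun q : String × Int => q.2) ∘ (fun p : Int × String => (p.2, p.1))) =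
        (fun p : Int × String => p.1) := rfl
    rw [hpred, hproj, List.nil_append]
    exact pv_pos_filter cs n 0
  have hitems : groups.items = (PySem.Set.ofList cs).map (fun n => (n, pvPosF cs n 0)) := by
    rw [PySem.Dict.items_eq_map_keys groups hnodup [], hkeys]
    exact List.map_congr_left (fun n _ => by rw [hgetD n])
  have halt : dis_make_unique_alt names =
      groups.items.foldl pvScatter (List.replicate cs.length "") := by
    simp only [dis_make_unique_alt]
    rw [hclean]
    rfl
  obtain ⟨hlenf, hgetf⟩ := pv_outer cs (PySem.Set.ofList cs) (List.replicate cs.length "")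
    (by simp) (PySem.Set.nodup_ofList cs)
  rw [halt, hitems]
  apply List.ext_getElem?
  intro j
  by_cases hj : j < cs.length
  · rw [hgetf j hj]
    have hmem : cs.getD j "" ∈ PySem.Set.ofList cs := by
      rw [List.getD_eq_getElem cs "" hj]
      exact (PySem.Set.mem_ofList cs _).mpr (List.getElem_mem hj)
    rw [if_pos hmem]
    simp [pvTarget, hj]
  · have h1 : (((PySem.Set.ofList cs).map (fun n => (n, pvPosF cs n 0))).foldl pvScatter
        (List.replicate cs.length "")).length = cs.length := by
      rw [hlenf]; simp
    have e1 : (((PySem.Set.ofList cs).map (fun n => (n, pvPosF cs n 0))).foldl pvScatter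
        (List.replicate cs.length ""))[j]? = none :=
      List.getElem?_eq_none (by rw [h1]; omega)
    have e2 : (pvTarget cs)[j]? = none :=
      List.getElem?_eq_none (by simp [pvTarget]; omega)
    rw [e1, e2]

theorem pv_AB (names : List String) : dis_make_unique names = dis_make_unique_alt names := by
  rw [pvA_target, pvB_target]


-- ===== VERDICT (by name: the statement is the Claim_ definition above) =====
theorem dis_make_unique_spec : Claim_equal_dis_make_unique := by
  intro names _; unfold Spec_dis_make_unique; exact pv_AB names
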